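-- pv_equiv track=rewrite | github.com/E0min/Coding_Test | 프로그래머스 Lv.0/숨어있는 숫자의 덧셈(2).py | solution
-- ===== SOURCE A (Python) =====
-- def solution(my_string):
--     answer = ''
--
--     for i in range(len(my_string)):
--         num=''
--         if my_string[i].isdigit():
--             num +=my_string[i]
--             for a in range(i+1,len(my_string)):
--                 if my_string[a].isdigit():
--                     num +=my_string[a]
--                 else:
--                     break
--         answer = answer + num
--     return answer
-- ===== SOURCE B (Python) =====
-- def _suffixes(run):
--     if not run:
--         return []
--     return [run] + _suffixes(run[1:])
--
--
-- def solution(my_string):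
--     parts = []
--     run = ''
--     for ch in my_string:
--         if ch.isdigit():
--             run += ch
--         else:
--             parts.extend(_suffixes(run))
--             run = ''
--     parts.extend(_suffixes(run))
--     return ''.join(parts)
-- ===== Notes on version B (the rewrite author's own statement) =====
-- stated objective: simpler
-- what changed: B makes a single left-to-right pass that accumulates each maximal digit run once and then emits the run's suffixes, instead of A's per-index forward rescan with an inner break loop.
import Mathlib
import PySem

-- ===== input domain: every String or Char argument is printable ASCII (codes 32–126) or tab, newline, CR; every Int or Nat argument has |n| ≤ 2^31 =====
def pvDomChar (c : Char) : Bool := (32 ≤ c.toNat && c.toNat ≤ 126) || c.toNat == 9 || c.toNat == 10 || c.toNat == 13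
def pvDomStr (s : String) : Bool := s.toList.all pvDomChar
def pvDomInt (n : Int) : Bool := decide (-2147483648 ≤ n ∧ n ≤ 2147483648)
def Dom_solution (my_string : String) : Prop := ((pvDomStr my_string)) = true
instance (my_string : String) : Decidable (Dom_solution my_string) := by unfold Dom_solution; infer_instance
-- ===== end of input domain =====

-- B replaces A's per-index forward rescan (inner loop with break) by one pass that
-- collects each maximal digit run once and emits its suffixes; objective: simpler.

-- ===== PORT A =====
-- inner loop: for a in range(i+1, len(s)): collect digits, break at first non-digit
def solAInner (s : List Char) (a : Nat) (num : List Char) : List Char :=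
  if h : a < s.length then
    if PySem.Chars.isdigit s[a] then solAInner s (a + 1) (num ++ [s[a]]) else num
  else num
termination_by s.length - a

-- outer loop: for i in range(len(s))
def solALoop (s : List Char) (i : Nat) (answer : List Char) : List Char :=
  if h : i < s.length then
    -- num = s[i] plus the following digits (inner loop), or '' if s[i] is not a digit
    solALoop s (i + 1)
      (answer ++ (if PySem.Chars.isdigit s[i] then solAInner s (i + 1) [s[i]] else []))
  else answer
termination_by s.length - i

def solution (my_string : String) : String :=
  String.ofList (solALoop my_string.toList 0 [])

-- ===== PORT B =====
-- _suffixes(run): all suffixes of run, longest first, joined (we concatenate directly)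
def solBSuffixes (run : List Char) : List Char :=
  match run with
  | [] => []
  | _ :: t => run ++ solBSuffixes t

-- main loop of B: accumulate the current digit run; flush its suffixes at a non-digit / at the end
def solBLoop (s : List Char) (run : List Char) : List Char :=
  match s with
  | [] => solBSuffixes run
  | c :: t =>
      if PySem.Chars.isdigit c then solBLoop t (run ++ [c])
      else solBSuffixes run ++ solBLoop t []

def solution_alt (my_string : String) : String :=
  String.ofList (solBLoop my_string.toList [])

-- ===== PRECONDITION & SPEC =====
def Spec_solution (my_string : String) (out : String) : Prop := out = solution_alt my_string
instance (my_string : String) (out : String) : Decidable (Spec_solution my_string out) := by unfold Spec_solution; infer_instance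

-- ===== CLAIM (what is proved, stated in full; the proofs are below) =====
def Claim_equal_solution : Prop := ∀ (my_string : String), Dom_solution my_string → Spec_solution my_string (solution my_string)

-- ===== LEMMAS AND PROOFS =====

-- structural characterisation of A's outer loop: per suffix position, emit the digit run starting there
def solA' (s : List Char) : List Char :=
  match s with
  | [] => []
  | c :: t =>
      (if PySem.Chars.isdigit c then c :: t.takeWhile PySem.Chars.isdigit else []) ++ solA' t

-- suffixes of run, each extended by w, concatenated
def sufCatW (run w : List Char) : List Char :=
  match run with
  | [] => []
  | _ :: t => (run ++ w) ++ sufCatW t w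

theorem solAInner_eq (s : List Char) (a : Nat) (num : List Char) :
    solAInner s a num = num ++ (s.drop a).takeWhile PySem.Chars.isdigit := by
  induction a, num using solAInner.induct s with
  | case1 a num h hd ih =>
      rw [solAInner, dif_pos h, if_pos hd, ih]
      conv_rhs => rw [List.drop_eq_getElem_cons h, List.takeWhile_cons]
      rw [if_pos hd]
      simp
  | case2 a num h hd =>
      rw [solAInner, dif_pos h, if_neg hd]
      rw [List.drop_eq_getElem_cons h, List.takeWhile_cons, if_neg hd]
      simp
  | case3 a num h =>
      rw [solAInner, dif_neg h]
      simp [List.drop_eq_nil_of_le (le_of_not_gt h)]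

theorem solALoop_eq (s : List Char) (i : Nat) (answer : List Char) :
    solALoop s i answer = answer ++ solA' (s.drop i) := by
  induction i, answer using solALoop.induct s with
  | case1 i answer h ih =>
      rw [solALoop, dif_pos h]
      simp only [dite_eq_ite] at ih
      rw [ih]
      rw [List.drop_eq_getElem_cons h]
      by_cases hd : PySem.Chars.isdigit s[i]
      · simp only [solA', hd, if_pos, solAInner_eq, List.append_assoc, List.singleton_append]
      · simp [solA', hd]
  | case2 i answer h =>
      rw [solALoop, dif_neg h]
      simp [List.drop_eq_nil_of_le (le_of_not_gt h), solA']

theorem sufCatW_nil (run : List Char) : sufCatW run [] = solBSuffixes run := by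
  induction run with
  | nil => rfl
  | cons c t ih => simp [sufCatW, solBSuffixes, ih]

theorem sufCatW_snoc (run : List Char) (c : Char) (w : List Char) :
    sufCatW run (c :: w) ++ (c :: w) = sufCatW (run ++ [c]) w := by
  induction run with
  | nil => simp [sufCatW]
  | cons r t ih => simp [sufCatW, ← ih]

theorem solBLoop_eq (s : List Char) (run : List Char) :
    solBLoop s run = sufCatW run (s.takeWhile PySem.Chars.isdigit) ++ solA' s := by
  induction s generalizing run with
  | nil => simp [solBLoop, solA', List.takeWhile_nil, sufCatW_nil]
  | cons c t ih =>
      by_cases hd : PySem.Chars.isdigit c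
      · rw [solBLoop, if_pos hd, ih, solA', List.takeWhile_cons, if_pos hd, ← sufCatW_snoc]
        simp
      · rw [solBLoop, if_neg hd, ih, solA', List.takeWhile_cons, if_neg hd]
        simp [sufCatW, sufCatW_nil]

-- ===== VERDICT (by name: the statement is the Claim_ definition above) =====
theorem solution_spec : Claim_equal_solution := by
  intro my_string _
  unfold Spec_solution solution solution_alt
  rw [solALoop_eq, solBLoop_eq]
  simp [sufCatW]
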